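-- pv_equiv track=rewrite | github.com/Sh-IT0311/Coding-Test | softeer/트럭.py | solution
-- ===== SOURCE A (Python) =====
-- def solution(data, Q):
--     answer = dict()
--
--     keys = list(data.keys())
--     k = len(keys)
--     keys.sort()
--
--     result = dict()
--     result[keys[0]] = data[keys[0]]
--     for i in range(1,k):
--         result[keys[i]] = data[keys[i]] + result[keys[i-1]]
--
--     temp = Q.copy()
--     temp.sort()
--
--     idx = 0
--     for target in temp:
--         if target <= result[keys[0]]:
--             answer[target] = keys[0]
--
--         elif target > result[keys[-1]]:
--             answer[target] = -1
--
--         else: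
--             while idx < k-1:
--                 if result[keys[idx]] < target <= result[keys[idx+1]]:
--                     answer[target] = keys[idx+1]
--                     break
--                 idx += 1
--
--     return answer
-- ===== SOURCE B (Python) =====
-- def first_reach(pref, t):
--     # index of the first prefix sum that t does not exceed; -1 if none
--     i = 0
--     for s in pref:
--         if t <= s:
--             return i
--         i += 1
--     return -1
--
--
-- def classify(t, keys, pref):
--     if t <= pref[0]:
--         return keys[0]
--     if t > pref[-1]:
--         return -1
--     return keys[first_reach(pref, t)]
--
--
-- def solution(data, Q):
--     keys = sorted(data)
--     pref = []
--     s = 0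
--     for key in keys:
--         s += data[key]
--         pref.append(s)
--     return {t: classify(t, keys, pref) for t in sorted(set(Q))}
-- ===== Notes on version B (the rewrite author's own statement) =====
-- stated objective: alternative
-- what changed: A sorts the queries and sweeps them with a persistent two-pointer over a prefix-sum dict (a stateful amortized merge); B answers each distinct query independently and statelessly, building the answer as a dict comprehension whose value is 'the first prefix sum the target does not exceed' found by a fresh scan per query - no query ordering is exploited and no pointer state is carried between queries.
-- outside the precondition, e.g. on solution({}, [1]): A raises IndexError, B raises IndexError
import Mathlib
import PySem

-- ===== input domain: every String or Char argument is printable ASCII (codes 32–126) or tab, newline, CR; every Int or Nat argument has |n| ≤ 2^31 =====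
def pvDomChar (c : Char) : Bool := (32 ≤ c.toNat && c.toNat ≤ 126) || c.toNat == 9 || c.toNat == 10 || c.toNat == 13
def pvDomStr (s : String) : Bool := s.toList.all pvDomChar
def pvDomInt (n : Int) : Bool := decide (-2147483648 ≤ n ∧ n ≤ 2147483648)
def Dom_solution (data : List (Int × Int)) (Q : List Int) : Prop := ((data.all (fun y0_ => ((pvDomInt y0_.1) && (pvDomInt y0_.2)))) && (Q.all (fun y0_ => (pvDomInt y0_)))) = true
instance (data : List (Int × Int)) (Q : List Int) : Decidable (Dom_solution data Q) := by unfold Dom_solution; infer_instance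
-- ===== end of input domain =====

-- B replaces A's stateful sorted-query two-pointer sweep by a stateless per-query
-- first-reach scan of the prefix-sum table (objective: alternative; not faster).

-- ===== PORT A =====
-- inner 'while idx < k-1: …' loop of A (fuel = k-1-idx, exactly the loop variable's headroom)
def solWhile (result : PySem.Dict Int Int) (keys : List Int) (k : Int)
    (ans : PySem.Dict Int Int) (idx : Int) (target : Int) : PySem.Dict Int Int × Int :=
  if _h : idx < k - 1 then
    if PySem.Dict.getD result (PySem.List.pyGetD keys idx 0) 0 < target ∧
        target ≤ PySem.Dict.getD result (PySem.List.pyGetD keys (idx + 1) 0) 0 then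
      (PySem.Dict.insert ans target (PySem.List.pyGetD keys (idx + 1) 0), idx)
    else
      solWhile result keys k ans (idx + 1) target
  else (ans, idx)
termination_by (k - 1 - idx).toNat
decreasing_by omega

-- keys[0] / result[keys[…]] raise on empty data (IndexError): excluded by Pre_solution, so the
-- pyGetD/getD defaults below are never the returned value on admitted inputs.
def solution (data : List (Int × Int)) (Q : List Int) : List (Int × Int) :=
  let d : PySem.Dict Int Int := PySem.Dict.mk data
  let keys : List Int := PySem.List.sorted (PySem.Dict.keys d) (fun x => x) false
  let k : Int := (keys.length : Int)
  let result0 : PySem.Dict Int Int :=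
    PySem.Dict.insert PySem.Dict.empty (PySem.List.pyGetD keys 0 0)
      (PySem.Dict.getD d (PySem.List.pyGetD keys 0 0) 0)
  let result : PySem.Dict Int Int :=
    (PySem.List.pyRange 1 k 1).foldl
      (fun res i =>
        PySem.Dict.insert res (PySem.List.pyGetD keys i 0)
          (PySem.Dict.getD d (PySem.List.pyGetD keys i 0) 0 +
            PySem.Dict.getD res (PySem.List.pyGetD keys (i - 1) 0) 0))
      result0
  let temp : List Int := PySem.List.sorted Q (fun x => x) false
  let fin :=
    temp.foldl
      (fun st target =>
        if target ≤ PySem.Dict.getD result (PySem.List.pyGetD keys 0 0) 0 then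
          (PySem.Dict.insert st.1 target (PySem.List.pyGetD keys 0 0), st.2)
        else if PySem.Dict.getD result (PySem.List.pyGetD keys (-1) 0) 0 < target then
          (PySem.Dict.insert st.1 target (-1), st.2)
        else solWhile result keys k st.1 st.2 target)
      (PySem.Dict.empty, (0 : Int))
  fin.1.items

-- ===== PORT B =====
-- Source B's first_reach: index of the first prefix sum that t does not exceed; -1 if none
def firstReach : List Int → Int → Int → Int
  | [], _, _ => -1
  | s :: rest, t, i => if t ≤ s then i else firstReach rest t (i + 1)

-- Source B's classify helper (pref[0]/pref[-1] raise IndexError on empty pref, as A does: Pre_)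
def classify (t : Int) (keys pref : List Int) : Int :=
  if t ≤ PySem.List.pyGetD pref 0 0 then PySem.List.pyGetD keys 0 0
  else if PySem.List.pyGetD pref (-1) 0 < t then -1
  else PySem.List.pyGetD keys (firstReach pref t 0) 0

def solution_alt (data : List (Int × Int)) (Q : List Int) : List (Int × Int) :=
  let d : PySem.Dict Int Int := PySem.Dict.mk data
  let keys : List Int := PySem.List.sorted (PySem.Dict.keys d) (fun x => x) false
  let pref : List Int :=
    (keys.foldl (fun acc key =>
        (acc.1 + PySem.Dict.getD d key 0, acc.2 ++ [acc.1 + PySem.Dict.getD d key 0]))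
      ((0 : Int), ([] : List Int))).2
  ((PySem.List.sorted (PySem.Set.ofList Q) (fun x => x) false).foldl
      (fun a t => PySem.Dict.insert a t (classify t keys pref)) PySem.Dict.empty).items

-- ===== PRECONDITION & SPEC =====
-- Pre_ excludes empty data, where both programs raise IndexError (keys[0] / pref[-1]); and
-- association lists with duplicate first components, which do not arise from any Python dict
-- (the parameter 'data' is a dict, whose items always have pairwise-distinct keys).
def Pre_solution (data : List (Int × Int)) (Q : List Int) : Prop :=
  data ≠ [] ∧ (data.map Prod.fst).Nodup
instance (data : List (Int × Int)) (Q : List Int) : Decidable (Pre_solution data Q) := by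
  unfold Pre_solution; infer_instance

def pvWitness_solution : (List (Int × Int)) × List Int := ([(1, 5), (2, 3)], [4, 9, 100])

def Spec_solution (data : List (Int × Int)) (Q : List Int) (out : List (Int × Int)) : Prop :=
  out = solution_alt data Q
instance (data : List (Int × Int)) (Q : List Int) (out : List (Int × Int)) :
    Decidable (Spec_solution data Q out) := by unfold Spec_solution; infer_instance

-- ===== CLAIM (what is proved, stated in full; the proofs are below) =====
def Claim_equal_solution : Prop := ∀ (data : List (Int × Int)) (Q : List Int),
  Dom_solution data Q → Pre_solution data Q → Spec_solution data Q (solution data Q)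

-- ===== LEMMAS AND PROOFS =====

-- prefix-sum list of the values of the (sorted) keys, starting from a running sum s
def prefL (d : PySem.Dict Int Int) (s : Int) : List Int → List Int
  | [] => []
  | x :: xs => (s + PySem.Dict.getD d x 0) :: prefL d (s + PySem.Dict.getD d x 0) xs

-- A's inner while with the dict lookups replaced by prefix-list lookups
def specWhile (pref keys : List Int) (k : Int) (ans : PySem.Dict Int Int) (idx t : Int) :
    PySem.Dict Int Int × Int :=
  if _h : idx < k - 1 then
    if PySem.List.pyGetD pref idx 0 < t ∧ t ≤ PySem.List.pyGetD pref (idx + 1) 0 then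
      (PySem.Dict.insert ans t (PySem.List.pyGetD keys (idx + 1) 0), idx)
    else specWhile pref keys k ans (idx + 1) t
  else (ans, idx)
termination_by (k - 1 - idx).toNat
decreasing_by omega

-- A's per-target step, on prefix-list lookups
def specStep (pref keys : List Int) (k lo hi : Int) (st : PySem.Dict Int Int × Int) (t : Int) :
    PySem.Dict Int Int × Int :=
  if t ≤ lo then (PySem.Dict.insert st.1 t (PySem.List.pyGetD keys 0 0), st.2)
  else if hi < t then (PySem.Dict.insert st.1 t (-1), st.2)
  else specWhile pref keys k st.1 st.2 t

-- removal of adjacent duplicates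
def cdedup : List Int → List Int
  | [] => []
  | [a] => [a]
  | a :: b :: l => if a = b then cdedup (b :: l) else a :: cdedup (b :: l)

-- Nat-valued specification of firstReach: index of the first element ≥ t
def frN : List Int → Int → Option Nat
  | [], _ => none
  | s :: rest, t => if t ≤ s then some 0 else (frN rest t).map (· + 1)

theorem prefL_foldl (d : PySem.Dict Int Int) :
    ∀ (l : List Int) (s : Int) (acc : List Int),
    l.foldl (fun acc key =>
        (acc.1 + PySem.Dict.getD d key 0, acc.2 ++ [acc.1 + PySem.Dict.getD d key 0])) (s, acc)
      = (s + (l.map (fun x => PySem.Dict.getD d x 0)).sum, acc ++ prefL d s l) := by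
  intro l
  induction l with
  | nil => intro s acc; simp [prefL]
  | cons x xs ih =>
    intro s acc
    simp only [List.foldl_cons, ih, prefL, List.map_cons, List.sum_cons]
    rw [Prod.mk.injEq]
    constructor
    · ring
    · simp

theorem prefL_length (d : PySem.Dict Int Int) :
    ∀ (l : List Int) (s : Int), (prefL d s l).length = l.length := by
  intro l
  induction l with
  | nil => intro s; rfl
  | cons x xs ih => intro s; simp [prefL, ih]

theorem prefL_succ (d : PySem.Dict Int Int) :
    ∀ (l : List Int) (s : Int) (i : Nat) (h : i + 1 < l.length),
    (prefL d s l)[i + 1]'(by rw [prefL_length]; exact h)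
      = (prefL d s l)[i]'(by rw [prefL_length]; omega) + PySem.Dict.getD d (l[i + 1]'h) 0 := by
  intro l
  induction l with
  | nil => intro s i h; simp at h
  | cons x xs ih =>
    intro s i h
    cases i with
    | zero =>
      cases xs with
      | nil => simp at h
      | cons y ys => simp [prefL]
    | succ i =>
      have h' : i + 1 < xs.length := by simpa using h
      simpa [prefL] using ih (s + PySem.Dict.getD d x 0) i h'

-- A's 'result' dict agrees with the prefix list on every sorted key
theorem result_getD (d : PySem.Dict Int Int) (ks : List Int) (hnd : ks.Nodup) :
    ∀ (m : Nat), 1 ≤ m → ∀ (hmk : m ≤ ks.length), ∀ (i : Nat) (hi : i < m),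
    PySem.Dict.getD
      ((PySem.List.pyRange 1 (m : Int) 1).foldl
        (fun res q =>
          PySem.Dict.insert res (PySem.List.pyGetD ks q 0)
            (PySem.Dict.getD d (PySem.List.pyGetD ks q 0) 0 +
              PySem.Dict.getD res (PySem.List.pyGetD ks (q - 1) 0) 0))
        (PySem.Dict.insert PySem.Dict.empty (PySem.List.pyGetD ks 0 0)
          (PySem.Dict.getD d (PySem.List.pyGetD ks 0 0) 0)))
      (ks[i]'(lt_of_lt_of_le hi hmk)) 0
      = (prefL d 0 ks)[i]'(by rw [prefL_length]; exact lt_of_lt_of_le hi hmk) := by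
  intro m
  induction m with
  | zero => omega
  | succ m ih =>
    intro _h1 hmk i hi
    by_cases hm : m = 0
    · subst hm
      have h0 : (0 : Nat) < ks.length := by omega
      have : i = 0 := by omega
      subst this
      rw [show ((1 : Nat) : Int) = 1 by norm_num, PySem.List.pyRange_one_eq_nil (by norm_num)]
      simp only [List.foldl_nil]
      rw [PySem.List.pyGetD_eq_getElem ks 0 (by norm_num) (by exact_mod_cast h0)]
      simp only [Int.toNat_zero]
      rw [PySem.Dict.getD_insert_self]
      cases ks with
      | nil => simp at h0
      | cons x xs => simp [prefL]
    · have hm1 : 1 ≤ m := by omega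
      have hcast : ((m + 1 : Nat) : Int) = (m : Int) + 1 := by push_cast; ring
      rw [hcast, PySem.List.pyRange_one_succ_right (by exact_mod_cast hm1), List.foldl_append]
      simp only [List.foldl_cons, List.foldl_nil]
      have hmlen : m < ks.length := by omega
      have e1 : PySem.List.pyGetD ks (m : Int) 0 = ks[m]'hmlen :=
        PySem.List.pyGetD_ofNat ks m 0 hmlen
      have e2 : PySem.List.pyGetD ks ((m : Int) - 1) 0 = ks[m - 1]'(by omega) := by
        rw [PySem.List.pyGetD_eq_getElem ks 0 (by omega) (by omega)]
        congr 1
        omega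
      rw [e1, e2]
      rw [ih hm1 (by omega) (m - 1) (by omega)]
      by_cases him : i = m
      · subst him
        rw [PySem.Dict.getD_insert_self]
        have key : (prefL d 0 ks)[i]'(by rw [prefL_length]; omega)
            = (prefL d 0 ks)[i - 1]'(by rw [prefL_length]; omega)
              + PySem.Dict.getD d (ks[i]'hmlen) 0 := by
          have h := prefL_succ d ks 0 (i - 1) (by omega)
          have hidx : i - 1 + 1 = i := by omega
          simp only [hidx] at h
          exact h
        rw [key]
        ring
      · have hne : ks[i]'(by omega) ≠ ks[m]'hmlen := by
          intro hcontra
          exact him ((hnd.getElem_inj_iff).mp hcontra)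
        rw [PySem.Dict.getD_insert_of_ne _ _ _ hne]
        exact ih hm1 (by omega) i (by omega)

theorem specWhile_ge (pref keys : List Int) (k : Int) (ans : PySem.Dict Int Int)
    (idx t : Int) : idx ≤ (specWhile pref keys k ans idx t).2 := by
  rw [specWhile]
  by_cases h : idx < k - 1
  · rw [dif_pos h]
    by_cases hc : PySem.List.pyGetD pref idx 0 < t ∧ t ≤ PySem.List.pyGetD pref (idx + 1) 0
    · rw [if_pos hc]
    · rw [if_neg hc]
      have := specWhile_ge pref keys k ans (idx + 1) t
      omega
  · rw [dif_neg h]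
termination_by (k - 1 - idx).toNat
decreasing_by omega

theorem specWhile_idem (pref keys : List Int) (k : Int) (ans : PySem.Dict Int Int)
    (idx t : Int) :
    specWhile pref keys k (specWhile pref keys k ans idx t).1
      (specWhile pref keys k ans idx t).2 t = specWhile pref keys k ans idx t := by
  by_cases h : idx < k - 1
  · by_cases hc : PySem.List.pyGetD pref idx 0 < t ∧ t ≤ PySem.List.pyGetD pref (idx + 1) 0
    · have hw : specWhile pref keys k ans idx t
          = (PySem.Dict.insert ans t (PySem.List.pyGetD keys (idx + 1) 0), idx) := by
        rw [specWhile, dif_pos h, if_pos hc]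
      rw [hw]
      simp only
      rw [specWhile, dif_pos h, if_pos hc, PySem.Dict.insert_insert_self]
    · have hw : specWhile pref keys k ans idx t = specWhile pref keys k ans (idx + 1) t := by
        conv_lhs => rw [specWhile, dif_pos h, if_neg hc]
      rw [hw]
      exact specWhile_idem pref keys k ans (idx + 1) t
  · have hw : specWhile pref keys k ans idx t = (ans, idx) := by
      rw [specWhile, dif_neg h]
    rw [hw]
    simp only
    rw [specWhile, dif_neg h]
termination_by (k - 1 - idx).toNat
decreasing_by omega

theorem specStep_idem (pref keys : List Int) (k lo hi : Int)
    (st : PySem.Dict Int Int × Int) (t : Int) :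
    specStep pref keys k lo hi (specStep pref keys k lo hi st t) t
      = specStep pref keys k lo hi st t := by
  unfold specStep
  by_cases h1 : t ≤ lo
  · rw [if_pos h1, if_pos h1]
    simp [PySem.Dict.insert_insert_self]
  · rw [if_neg h1, if_neg h1]
    by_cases h2 : hi < t
    · rw [if_pos h2, if_pos h2]
      simp [PySem.Dict.insert_insert_self]
    · rw [if_neg h2, if_neg h2]
      exact specWhile_idem pref keys k st.1 st.2 t

theorem specStep_nonneg (pref keys : List Int) (k lo hi : Int)
    (st : PySem.Dict Int Int × Int) (t : Int) (h : 0 ≤ st.2) :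
    0 ≤ (specStep pref keys k lo hi st t).2 := by
  unfold specStep
  by_cases h1 : t ≤ lo
  · rw [if_pos h1]; exact h
  · rw [if_neg h1]
    by_cases h2 : hi < t
    · rw [if_pos h2]; exact h
    · rw [if_neg h2]
      have := specWhile_ge pref keys k st.1 st.2 t
      omega

-- A's inner while equals its prefix-list form (under the result/pref correspondence)
theorem solWhile_eq (result : PySem.Dict Int Int) (pref ks : List Int)
    (hlen : pref.length = ks.length)
    (hF2 : ∀ (i : Nat) (h : i < ks.length),
      PySem.Dict.getD result (ks[i]'h) 0 = pref[i]'(by rw [hlen]; exact h))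
    (ans : PySem.Dict Int Int) (idx t : Int) (hidx : 0 ≤ idx) :
    solWhile result ks ((ks.length : Int)) ans idx t
      = specWhile pref ks ((ks.length : Int)) ans idx t := by
  rw [solWhile, specWhile]
  by_cases h : idx < (ks.length : Int) - 1
  · rw [dif_pos h, dif_pos h]
    have e1 : PySem.Dict.getD result (PySem.List.pyGetD ks idx 0) 0
        = PySem.List.pyGetD pref idx 0 := by
      rw [PySem.List.pyGetD_eq_getElem ks 0 hidx (by omega),
          PySem.List.pyGetD_eq_getElem pref 0 hidx (by rw [hlen]; omega)]
      exact hF2 idx.toNat (by omega)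
    have e2 : PySem.Dict.getD result (PySem.List.pyGetD ks (idx + 1) 0) 0
        = PySem.List.pyGetD pref (idx + 1) 0 := by
      rw [PySem.List.pyGetD_eq_getElem ks 0 (by omega) (by omega),
          PySem.List.pyGetD_eq_getElem pref 0 (by omega) (by rw [hlen]; omega)]
      exact hF2 (idx + 1).toNat (by omega)
    rw [e1, e2]
    by_cases hc : PySem.List.pyGetD pref idx 0 < t ∧ t ≤ PySem.List.pyGetD pref (idx + 1) 0
    · rw [if_pos hc, if_pos hc]
    · rw [if_neg hc, if_neg hc]
      exact solWhile_eq result pref ks hlen hF2 ans (idx + 1) t (by omega)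
  · rw [dif_neg h, dif_neg h]
termination_by ((ks.length : Int) - 1 - idx).toNat
decreasing_by omega

-- A's whole query loop equals the prefix-list fold
theorem foldA_eq (result : PySem.Dict Int Int) (pref ks : List Int)
    (hlen : pref.length = ks.length) (hne : ks ≠ [])
    (hF2 : ∀ (i : Nat) (h : i < ks.length),
      PySem.Dict.getD result (ks[i]'h) 0 = pref[i]'(by rw [hlen]; exact h)) :
    ∀ (l : List Int) (st : PySem.Dict Int Int × Int), 0 ≤ st.2 →
    l.foldl (fun st target =>
        if target ≤ PySem.Dict.getD result (PySem.List.pyGetD ks 0 0) 0 then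
          (PySem.Dict.insert st.1 target (PySem.List.pyGetD ks 0 0), st.2)
        else if PySem.Dict.getD result (PySem.List.pyGetD ks (-1) 0) 0 < target then
          (PySem.Dict.insert st.1 target (-1), st.2)
        else solWhile result ks ((ks.length : Int)) st.1 st.2 target) st
      = l.foldl (specStep pref ks ((ks.length : Int))
          (PySem.List.pyGetD pref 0 0) (PySem.List.pyGetD pref (-1) 0)) st := by
  have hkpos : 0 < ks.length := List.length_pos_iff.mpr hne
  have hpne : pref ≠ [] := by
    intro hcontra
    rw [hcontra] at hlen
    simp at hlen
    omega
  have elo : PySem.Dict.getD result (PySem.List.pyGetD ks 0 0) 0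
      = PySem.List.pyGetD pref 0 0 := by
    rw [PySem.List.pyGetD_eq_getElem ks 0 (by norm_num) (by exact_mod_cast hkpos),
        PySem.List.pyGetD_eq_getElem pref 0 (by norm_num) (by rw [hlen]; exact_mod_cast hkpos)]
    simpa using hF2 0 hkpos
  have ehi : PySem.Dict.getD result (PySem.List.pyGetD ks (-1) 0) 0
      = PySem.List.pyGetD pref (-1) 0 := by
    rw [PySem.List.pyGetD_neg_one ks 0 hne, PySem.List.pyGetD_neg_one pref 0 hpne,
        List.getLast_eq_getElem hne, List.getLast_eq_getElem hpne]
    have := hF2 (ks.length - 1) (by omega)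
    rw [this]
    congr 1
    omega
  intro l
  induction l with
  | nil => intro st h; rfl
  | cons t l ih =>
    intro st hst
    rw [List.foldl_cons, List.foldl_cons]
    have hstep : (if t ≤ PySem.Dict.getD result (PySem.List.pyGetD ks 0 0) 0 then
          (PySem.Dict.insert st.1 t (PySem.List.pyGetD ks 0 0), st.2)
        else if PySem.Dict.getD result (PySem.List.pyGetD ks (-1) 0) 0 < t then
          (PySem.Dict.insert st.1 t (-1), st.2)
        else solWhile result ks ((ks.length : Int)) st.1 st.2 t)
        = specStep pref ks ((ks.length : Int))
            (PySem.List.pyGetD pref 0 0) (PySem.List.pyGetD pref (-1) 0) st t := by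
      rw [elo, ehi]
      unfold specStep
      by_cases h1 : t ≤ PySem.List.pyGetD pref 0 0
      · rw [if_pos h1, if_pos h1]
      · rw [if_neg h1, if_neg h1]
        by_cases h2 : PySem.List.pyGetD pref (-1) 0 < t
        · rw [if_pos h2, if_pos h2]
        · rw [if_neg h2, if_neg h2]
          exact solWhile_eq result pref ks hlen hF2 st.1 st.2 t hst
    rw [hstep]
    exact ih _ (specStep_nonneg _ _ _ _ _ _ _ hst)

theorem mem_cdedup : ∀ (l : List Int) (x : Int), x ∈ cdedup l ↔ x ∈ l
  | [], x => by simp [cdedup]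
  | [a], x => by simp [cdedup]
  | a :: b :: l, x => by
    by_cases h : a = b
    · subst h
      simp only [cdedup, if_true]
      rw [mem_cdedup (a :: l) x]
      simp
    · simp only [cdedup, if_neg h, List.mem_cons]
      rw [mem_cdedup (b :: l) x]
      simp

theorem pairwise_lt_cdedup : ∀ (l : List Int), l.Pairwise (· ≤ ·) →
    (cdedup l).Pairwise (· < ·)
  | [] => by intro _; simp [cdedup]
  | [a] => by intro _; simp [cdedup]
  | a :: b :: l => by
    intro hp
    have htail : (b :: l).Pairwise (· ≤ ·) := (List.pairwise_cons.mp hp).2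
    by_cases h : a = b
    · subst h
      simp only [cdedup, if_true]
      exact pairwise_lt_cdedup (a :: l) htail
    · simp only [cdedup, if_neg h]
      refine List.Pairwise.cons ?_ (pairwise_lt_cdedup (b :: l) htail)
      intro x hx
      have hxbl : x ∈ b :: l := (mem_cdedup _ _).mp hx
      have hab : a ≤ b := (List.pairwise_cons.mp hp).1 b List.mem_cons_self
      have halt : a < b := lt_of_le_of_ne hab h
      cases List.mem_cons.mp hxbl with
      | inl hxb => rw [hxb]; exact halt
      | inr hxl =>
        have hbx : b ≤ x := (List.pairwise_cons.mp htail).1 x hxl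
        omega

theorem foldl_cdedup {β : Type} (f : β → Int → β)
    (hid : ∀ st t, f (f st t) t = f st t) :
    ∀ (l : List Int) (st : β), l.foldl f st = (cdedup l).foldl f st
  | [], st => rfl
  | [a], st => rfl
  | a :: b :: l, st => by
    by_cases h : a = b
    · subst h
      simp only [cdedup, if_true]
      rw [← foldl_cdedup f hid (a :: l) st]
      simp only [List.foldl_cons]
      rw [hid]
    · simp only [cdedup, if_neg h, List.foldl_cons]
      exact foldl_cdedup f hid (b :: l) (f st a)

-- adjacent dedup of sorted(Q) is sorted(set(Q))
theorem cdedup_sorted (Q : List Int) :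
    cdedup (PySem.List.sorted Q (fun x => x) false)
      = PySem.List.sorted (PySem.Set.ofList Q) (fun x => x) false := by
  have hpl : (cdedup (PySem.List.sorted Q (fun x => x) false)).Pairwise (· < ·) :=
    pairwise_lt_cdedup _ (PySem.List.sorted_pairwise Q (fun x => x))
  have hnd1 : (cdedup (PySem.List.sorted Q (fun x => x) false)).Nodup :=
    hpl.imp (fun h => ne_of_lt h)
  have hperm : (cdedup (PySem.List.sorted Q (fun x => x) false)).Perm
      (PySem.Set.ofList Q) := by
    rw [List.perm_ext_iff_of_nodup hnd1 (PySem.Set.nodup_ofList Q)]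
    intro a
    rw [mem_cdedup, PySem.List.mem_sorted, PySem.Set.mem_ofList]
  exact (PySem.List.sorted_eq_of_perm_of_pairwise_lt _ _ _ hperm hpl).symm

-- firstReach computes frN (accumulator-shifted)
theorem firstReach_frN : ∀ (l : List Int) (t i : Int),
    firstReach l t i = (match frN l t with | some n => i + (n : Int) | none => -1) := by
  intro l
  induction l with
  | nil => intro t i; rfl
  | cons s rest ih =>
    intro t i
    by_cases h : t ≤ s
    · simp [firstReach, frN, h]
    · simp only [firstReach, frN, if_neg h]
      rw [ih t (i + 1)]
      cases hf : frN rest t with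
      | none => simp
      | some n =>
        simp only [Option.map_some]
        push_cast
        ring

-- facts about frN
theorem frN_none : ∀ (l : List Int) (t : Int), frN l t = none → ∀ s ∈ l, s < t := by
  intro l
  induction l with
  | nil => intro t _ s hs; simp at hs
  | cons a rest ih =>
    intro t h s hs
    by_cases ha : t ≤ a
    · simp [frN, ha] at h
    · simp only [frN, if_neg ha] at h
      cases List.mem_cons.mp hs with
      | inl he => subst he; omega
      | inr hm =>
        cases hf : frN rest t with
        | none => exact ih t hf s hm
        | some n => rw [hf] at h; simp at h

theorem frN_some : ∀ (l : List Int) (t : Int) (n : Nat), frN l t = some n →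
    ∃ h : n < l.length, t ≤ l[n]'h ∧ ∀ (j : Nat) (hj : j < l.length), j < n → l[j]'hj < t := by
  intro l
  induction l with
  | nil => intro t n h; simp [frN] at h
  | cons a rest ih =>
    intro t n h
    by_cases ha : t ≤ a
    · simp [frN, ha] at h
      subst h
      refine ⟨by simp, by simpa using ha, ?_⟩
      intro j hj hj0
      omega
    · simp only [frN, if_neg ha, Option.map_eq_some_iff] at h
      obtain ⟨m, hm, hmn⟩ := h
      obtain ⟨hlen, hle, hmin⟩ := ih t m hm
      subst hmn
      refine ⟨by simpa using Nat.succ_lt_succ hlen, by simpa using hle, ?_⟩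
      intro j hj hjm
      cases j with
      | zero => simpa using (by omega : a < t)
      | succ j =>
        have : j < rest.length := by simpa using hj
        simpa using hmin j this (by omega)

-- the inner while of A, started below the first reach index, stops exactly there
theorem specWhile_first (pref ks : List Int) (hlen : pref.length = ks.length)
    (t : Int) (n : Nat) (hf : frN pref t = some n)
    (idx : Int) (ans : PySem.Dict Int Int) (h0 : 0 ≤ idx) (hlt : idx < (n : Int)) :
    specWhile pref ks ((ks.length : Int)) ans idx t
      = (PySem.Dict.insert ans t (PySem.List.pyGetD ks (n : Int) 0), (n : Int) - 1) := by
  obtain ⟨hnlen, hle, hmin⟩ := frN_some pref t n hf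
  have hklen : idx < (ks.length : Int) - 1 := by
    have : n < pref.length := hnlen
    omega
  rw [specWhile, dif_pos hklen]
  have e1 : PySem.List.pyGetD pref idx 0 = pref[idx.toNat]'(by omega) :=
    PySem.List.pyGetD_eq_getElem pref 0 h0 (by omega)
  have hlow : PySem.List.pyGetD pref idx 0 < t := by
    rw [e1]
    exact hmin idx.toNat (by omega) (by omega)
  by_cases heq : idx + 1 = (n : Int)
  · have e2 : PySem.List.pyGetD pref (idx + 1) 0 = pref[n]'hnlen := by
      rw [PySem.List.pyGetD_eq_getElem pref 0 (by omega) (by omega)]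
      congr 1
      omega
    rw [if_pos ⟨hlow, by rw [e2]; exact hle⟩]
    rw [heq, show (n : Int) - 1 = idx by omega]
  · have e2 : PySem.List.pyGetD pref (idx + 1) 0 = pref[(idx + 1).toNat]'(by omega) :=
      PySem.List.pyGetD_eq_getElem pref 0 (by omega) (by omega)
    have hc : ¬ (PySem.List.pyGetD pref idx 0 < t ∧ t ≤ PySem.List.pyGetD pref (idx + 1) 0) := by
      rw [e2]
      have : pref[(idx + 1).toNat]'(by omega) < t := hmin (idx + 1).toNat (by omega) (by omega)
      omega
    rw [if_neg hc]
    exact specWhile_first pref ks hlen t n hf (idx + 1) ans (by omega) (by omega)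
termination_by ((n : Int) - idx).toNat
decreasing_by omega

-- A's query loop, on a strictly increasing query list, equals B's stateless classify fold
theorem foldB_eq (pref ks : List Int) (hlen : pref.length = ks.length) (hne : ks ≠ []) :
    ∀ (ts : List Int), ts.Pairwise (· < ·) →
    ∀ (idx : Int) (ans : PySem.Dict Int Int), 0 ≤ idx →
    (∀ t ∈ ts, PySem.List.pyGetD pref 0 0 < t →
      ∀ (j : Nat), (j : Int) ≤ idx → ∀ (hj : j < pref.length), pref[j]'hj < t) →
    (ts.foldl (specStep pref ks ((ks.length : Int))
        (PySem.List.pyGetD pref 0 0) (PySem.List.pyGetD pref (-1) 0)) (ans, idx)).1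
      = ts.foldl (fun a t => PySem.Dict.insert a t (classify t ks pref)) ans := by
  have hpne : pref ≠ [] := by
    intro hcontra
    rw [hcontra] at hlen
    exact hne (List.length_eq_zero_iff.mp hlen.symm)
  intro ts
  induction ts with
  | nil => intro _ idx ans _ _; rfl
  | cons t rest ih =>
    intro hpw idx ans h0 hinv
    have htail : rest.Pairwise (· < ·) := (List.pairwise_cons.mp hpw).2
    have hlt : ∀ u ∈ rest, t < u := (List.pairwise_cons.mp hpw).1
    rw [List.foldl_cons, List.foldl_cons]
    by_cases h1 : t ≤ PySem.List.pyGetD pref 0 0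
    · have hstep : specStep pref ks ((ks.length : Int)) (PySem.List.pyGetD pref 0 0)
          (PySem.List.pyGetD pref (-1) 0) (ans, idx) t
          = (PySem.Dict.insert ans t (PySem.List.pyGetD ks 0 0), idx) := by
        unfold specStep
        rw [if_pos h1]
      have hcl : classify t ks pref = PySem.List.pyGetD ks 0 0 := by
        unfold classify
        rw [if_pos h1]
      rw [hstep, hcl]
      exact ih htail idx _ h0 (fun u hu => hinv u (List.mem_cons_of_mem _ hu))
    · by_cases h2 : PySem.List.pyGetD pref (-1) 0 < t
      · have hstep : specStep pref ks ((ks.length : Int)) (PySem.List.pyGetD pref 0 0)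
            (PySem.List.pyGetD pref (-1) 0) (ans, idx) t
            = (PySem.Dict.insert ans t (-1), idx) := by
          unfold specStep
          rw [if_neg h1, if_pos h2]
        have hcl : classify t ks pref = -1 := by
          unfold classify
          rw [if_neg h1, if_pos h2]
        rw [hstep, hcl]
        exact ih htail idx _ h0 (fun u hu => hinv u (List.mem_cons_of_mem _ hu))
      · -- middle: t reaches some prefix sum; frN finds the first one
        have hsome : ∃ n, frN pref t = some n := by
          cases hfr : frN pref t with
          | some n => exact ⟨n, rfl⟩
          | none =>
            exfalso
            have hall := frN_none pref t hfr
            have hlast : PySem.List.pyGetD pref (-1) 0 = pref.getLast hpne :=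
              PySem.List.pyGetD_neg_one pref 0 hpne
            have : pref.getLast hpne < t := hall _ (List.getLast_mem hpne)
            omega
        obtain ⟨n, hfr⟩ := hsome
        obtain ⟨hnlen, hle, hmin⟩ := frN_some pref t n hfr
        have hlo : PySem.List.pyGetD pref 0 0 < t := by omega
        have hn0 : 0 < n := by
          rcases Nat.eq_zero_or_pos n with h | h
          · exfalso
            subst h
            have e0 : PySem.List.pyGetD pref 0 0 = pref[0]'hnlen :=
              PySem.List.pyGetD_ofNat pref 0 0 hnlen
            omega
          · exact h
        have hidxn : idx < (n : Int) := by
          by_contra hcon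
          have : pref[n]'hnlen < t := hinv t List.mem_cons_self hlo n (by omega) hnlen
          omega
        have hstep : specStep pref ks ((ks.length : Int)) (PySem.List.pyGetD pref 0 0)
            (PySem.List.pyGetD pref (-1) 0) (ans, idx) t
            = (PySem.Dict.insert ans t (PySem.List.pyGetD ks (n : Int) 0), (n : Int) - 1) := by
          unfold specStep
          rw [if_neg h1, if_neg h2]
          exact specWhile_first pref ks hlen t n hfr idx ans h0 hidxn
        have hcl : classify t ks pref = PySem.List.pyGetD ks (n : Int) 0 := by
          unfold classify
          rw [if_neg h1, if_neg h2, firstReach_frN, hfr]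
          norm_num
        rw [hstep, hcl]
        refine ih htail ((n : Int) - 1) _ (by omega) ?_
        intro u hu _hlo j hji hj
        have hjn : j < n := by omega
        have := hmin j hj hjn
        have := hlt u hu
        omega

theorem solution_main : ∀ (data : List (Int × Int)) (Q : List Int),
    data ≠ [] → (data.map Prod.fst).Nodup → solution data Q = solution_alt data Q := by
  intro data Q hne hnd
  unfold solution solution_alt
  simp only
  set d : PySem.Dict Int Int := PySem.Dict.mk data with hd
  set ks : List Int := PySem.List.sorted (PySem.Dict.keys d) (fun x => x) false with hks
  have hkeys : PySem.Dict.keys d = data.map Prod.fst := PySem.Dict.keys_mk data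
  have hksne : ks ≠ [] := by
    rw [hks]
    intro hcontra
    rw [PySem.List.sorted_eq_nil_iff, hkeys] at hcontra
    exact hne (List.map_eq_nil_iff.mp hcontra)
  have hknd : ks.Nodup := by
    rw [hks]
    exact ((PySem.List.sorted_perm (PySem.Dict.keys d) (fun x => x) false).symm).nodup
      (by rw [hkeys]; exact hnd)
  have hkpos : 0 < ks.length := List.length_pos_iff.mpr hksne
  rw [prefL_foldl d ks 0 []]
  dsimp only
  rw [List.nil_append]
  set pref : List Int := prefL d 0 ks with hpref
  have hpl : pref.length = ks.length := prefL_length d ks 0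
  have hF2 : ∀ (i : Nat) (h : i < ks.length),
      PySem.Dict.getD
        ((PySem.List.pyRange 1 ((ks.length : Nat) : Int) 1).foldl
          (fun res q =>
            PySem.Dict.insert res (PySem.List.pyGetD ks q 0)
              (PySem.Dict.getD d (PySem.List.pyGetD ks q 0) 0 +
                PySem.Dict.getD res (PySem.List.pyGetD ks (q - 1) 0) 0))
          (PySem.Dict.insert PySem.Dict.empty (PySem.List.pyGetD ks 0 0)
            (PySem.Dict.getD d (PySem.List.pyGetD ks 0 0) 0)))
        (ks[i]'h) 0 = pref[i]'(by rw [hpl]; exact h) :=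
    fun i h => result_getD d ks hknd ks.length (by omega) (le_refl _) i h
  rw [foldA_eq _ pref ks hpl hksne hF2 (PySem.List.sorted Q (fun x => x) false)
    (PySem.Dict.empty, 0) (by norm_num)]
  rw [foldl_cdedup _
    (specStep_idem pref ks ((ks.length : Int)) (PySem.List.pyGetD pref 0 0)
      (PySem.List.pyGetD pref (-1) 0))
    (PySem.List.sorted Q (fun x => x) false) (PySem.Dict.empty, 0)]
  rw [cdedup_sorted Q]
  have hpw : (PySem.List.sorted (PySem.Set.ofList Q) (fun x => x) false).Pairwise (· < ·) :=
    PySem.List.sorted_ofList_pairwise_lt Q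
  rw [foldB_eq pref ks hpl hksne _ hpw 0 PySem.Dict.empty (by norm_num) ?_]
  intro t _ hlo j hj0 hj
  have hj0' : j = 0 := by omega
  subst hj0'
  have e : PySem.List.pyGetD pref 0 0 = pref[0]'hj := by
    simpa using PySem.List.pyGetD_ofNat pref 0 0 hj
  rwa [e] at hlo

-- ===== VERDICT (by name: the statement is the Claim_ definition above) =====
theorem solution_spec : Claim_equal_solution := by
  intro data Q _hdom hpre
  unfold Spec_solution
  exact solution_main data Q hpre.1 hpre.2
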